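-- pv_equiv track=rewrite | github.com/Ynossy/AoC | 2021/10/syntax_parsing.py | score_missing
-- ===== SOURCE A (Python) =====
-- def score_missing(stack):
--     # score the remaining OPENING characters on the Stack
--     score = 0
--     points = {"[": 2, "(": 1, "<": 4, "{": 3}
--     while stack:
--         score *= 5
--         c = stack.pop()
--         score += points[c]
--     return score
-- ===== SOURCE B (Python) =====
-- def score_missing(stack):
--     # score the remaining OPENING characters on the Stack
--     points = {"[": 2, "(": 1, "<": 4, "{": 3}
--     values = []
--     while stack:
--         values.append(points[stack.pop()])
--     n = len(values)
--     return sum(v * 5 ** (n - 1 - i) for i, v in enumerate(values))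
-- ===== Notes on version B (the rewrite author's own statement) =====
-- stated objective: alternative
-- what changed: Replaces A's single Horner accumulator (score = score*5 + points[c] per pop) with a collect-then-combine decomposition: first drain the stack gathering point values in pop order, then compute the score as an explicit positional base-5 weighted sum v * 5**(n-1-i).
import Mathlib
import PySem

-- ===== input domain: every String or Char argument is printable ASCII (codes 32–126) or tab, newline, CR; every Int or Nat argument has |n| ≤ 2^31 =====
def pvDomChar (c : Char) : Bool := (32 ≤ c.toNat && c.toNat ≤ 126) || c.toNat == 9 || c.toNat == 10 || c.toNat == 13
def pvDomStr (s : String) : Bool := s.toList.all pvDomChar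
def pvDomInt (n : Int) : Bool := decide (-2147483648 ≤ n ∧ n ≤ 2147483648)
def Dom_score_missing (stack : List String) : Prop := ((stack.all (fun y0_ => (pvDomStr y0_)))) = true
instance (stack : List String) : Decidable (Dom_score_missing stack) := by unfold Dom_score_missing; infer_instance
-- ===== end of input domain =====

-- B replaces A's Horner accumulator by a collect-then-combine positional base-5 sum; same cost, different decomposition.
-- Both A and B empty-out the argument list in Python (stack.pop()); the equivalence proved here is about the return value.

-- ===== PORT A =====
-- the points dict, looked up with default 0 (Pre_ guarantees every element is a key, so the default is never used)
def pvPoints : PySem.Dict String Int :=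
  (((PySem.Dict.empty.insert "[" 2).insert "(" 1).insert "<" 4).insert "{" 3

-- A's while-loop: pops from the END of the list; we recurse over stack.reverse so each step handles the popped element
def pvALoop (score : Int) : List String → Int
  | [] => score
  | c :: rest => pvALoop (score * 5 + pvPoints.getD c 0) rest

def score_missing (stack : List String) : Int :=
  pvALoop 0 stack.reverse

-- ===== PORT B =====
-- B's draining loop appends points[stack.pop()] for each pop; popping the end repeatedly visits stack.reverse in order
def pvBCollect : List String → List Int
  | [] => []
  | c :: rest => pvPoints.getD c 0 :: pvBCollect rest

def score_missing_alt (stack : List String) : Int :=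
  let values := pvBCollect stack.reverse
  let n := values.length
  ((PySem.List.enumerate values).foldl (fun acc iv => acc + iv.2 * 5 ^ (n - 1 - iv.1.toNat) ) 0)

-- ===== PRECONDITION & SPEC =====
-- Pre_ excludes exactly the inputs where A raises KeyError: a stack element that is not one of the four opening brackets.
def Pre_score_missing (stack : List String) : Prop :=
  (stack.all (fun c => c = "[" || c = "(" || c = "<" || c = "{")) = true
instance (stack : List String) : Decidable (Pre_score_missing stack) := by
  unfold Pre_score_missing; infer_instance
def pvWitness_score_missing : List String := ["(", "[", "<", "{"]

def Spec_score_missing (stack : List String) (out : Int) : Prop := out = score_missing_alt stack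
instance (stack : List String) (out : Int) : Decidable (Spec_score_missing stack out) := by unfold Spec_score_missing; infer_instance

-- ===== CLAIM (what is proved, stated in full; the proofs are below) =====
def Claim_equal_score_missing : Prop := ∀ (stack : List String), Dom_score_missing stack → Pre_score_missing stack → Spec_score_missing stack (score_missing stack)

-- ===== LEMMAS AND PROOFS =====

-- B's weighted sum, written as a clean recursion (proof-only helper)
def pvWSum : List Int → Int
  | [] => 0
  | v :: rest => v * 5 ^ rest.length + pvWSum rest

theorem pvBCollect_eq_map (l : List String) : pvBCollect l = l.map (fun c => pvPoints.getD c 0) := by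
  induction l with
  | nil => rfl
  | cons c rest ih => simp [pvBCollect, ih]

-- the enumerate-fold is the weighted sum, provided the outer 'n' is at least the list length plus the start index
theorem pvFold_enum (values : List Int) (s : Nat) (n : Nat) (acc : Int)
    (h : n = s + values.length) :
    ((PySem.List.enumerate values (s : Int)).foldl
        (fun acc iv => acc + iv.2 * 5 ^ (n - 1 - iv.1.toNat)) acc)
      = acc + pvWSum values := by
  induction values generalizing s acc with
  | nil => simp [PySem.List.enumerate_nil, pvWSum]
  | cons v rest ih =>
    rw [PySem.List.enumerate_cons]
    simp only [List.foldl_cons]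
    have hs : ((s : Int) + 1) = ((s + 1 : Nat) : Int) := by push_cast; ring
    have h' : n = s + rest.length + 1 := by simp [List.length_cons] at h; omega
    rw [hs, ih (s + 1) (acc + v * 5 ^ (n - 1 - (Int.toNat s))) (by omega)]
    have h1 : n - 1 - s = rest.length := by omega
    simp [pvWSum, h1]; ring

-- A's Horner loop computes score * 5^len + the weighted sum
theorem pvALoop_eq (l : List String) : ∀ score : Int,
    pvALoop score l = score * 5 ^ l.length + pvWSum (pvBCollect l) := by
  induction l with
  | nil => intro score; simp [pvALoop, pvBCollect, pvWSum]
  | cons c rest ih =>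
    intro score
    rw [pvALoop, ih]
    have hlen : (pvBCollect rest).length = rest.length := by
      simp [pvBCollect_eq_map]
    simp [pvBCollect, pvWSum, hlen, List.length_cons, pow_succ]
    ring

-- ===== VERDICT (by name: the statement is the Claim_ definition above) =====
theorem score_missing_spec : Claim_equal_score_missing := by
  intro stack _ _
  show score_missing stack = score_missing_alt stack
  rw [score_missing, score_missing_alt, pvALoop_eq]
  have h := pvFold_enum (pvBCollect stack.reverse) 0 (pvBCollect stack.reverse).length 0 (by omega)
  norm_num at h
  rw [h]
  simp [pvBCollect_eq_map]
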